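-- pv_equiv track=rewrite | github.com/Zlqq123/rtm | hist_func.py | hist_2con
-- ===== SOURCE A (Python) =====
-- def hist_2con(input_data1,interval1,input_data2,interval2):
--     l1=len(interval1)-1
--     l2=len(interval2)-1
--     res=[]
--     interval_list1=[]
--     interval_list2=[]
--     for j in range(l2):
--         interval_list2.append(str(interval2[j])+'~'+str(interval2[j+1]))
--
--     for i in range(l1):
--         interval_list1.append(str(interval1[i])+'~'+str(interval1[i+1]))
--         res.append([])
--         for j in range(l2):
--             pp=0
--             for k in (range(len(input_data1))):
--                 value1=input_data1[k]
--                 value2=input_data2[k]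
--                 if value1>=interval1[i] and value1<interval1[i+1] and value2>=interval2[j] and value2<interval2[j+1]:
--                     pp+=1
--             res[i].append(pp)
--     return interval_list1,interval_list2,res
-- ===== SOURCE B (Python) =====
-- def hist_2con(input_data1, interval1, input_data2, interval2):
--     l1 = len(interval1) - 1
--     l2 = len(interval2) - 1
--     interval_list1 = [str(interval1[i]) + '~' + str(interval1[i + 1]) for i in range(l1)]
--     interval_list2 = [str(interval2[j]) + '~' + str(interval2[j + 1]) for j in range(l2)]
--     res = [[0] * l2 for _ in range(l1)]
--     for v1, v2 in zip(input_data1, input_data2):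
--         rows = [i for i in range(l1) if interval1[i] <= v1 < interval1[i + 1]]
--         cols = [j for j in range(l2) if interval2[j] <= v2 < interval2[j + 1]]
--         for i in rows:
--             for j in cols:
--                 res[i][j] += 1
--     return interval_list1, interval_list2, res
-- ===== Notes on version B (the rewrite author's own statement) =====
-- stated objective: faster
-- what changed: B makes one pass over the data points, classifying each point into its matching row/column bins and incrementing a prebuilt count matrix, instead of A's rescanning the whole data list once per (row,column) cell.
import Mathlib
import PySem

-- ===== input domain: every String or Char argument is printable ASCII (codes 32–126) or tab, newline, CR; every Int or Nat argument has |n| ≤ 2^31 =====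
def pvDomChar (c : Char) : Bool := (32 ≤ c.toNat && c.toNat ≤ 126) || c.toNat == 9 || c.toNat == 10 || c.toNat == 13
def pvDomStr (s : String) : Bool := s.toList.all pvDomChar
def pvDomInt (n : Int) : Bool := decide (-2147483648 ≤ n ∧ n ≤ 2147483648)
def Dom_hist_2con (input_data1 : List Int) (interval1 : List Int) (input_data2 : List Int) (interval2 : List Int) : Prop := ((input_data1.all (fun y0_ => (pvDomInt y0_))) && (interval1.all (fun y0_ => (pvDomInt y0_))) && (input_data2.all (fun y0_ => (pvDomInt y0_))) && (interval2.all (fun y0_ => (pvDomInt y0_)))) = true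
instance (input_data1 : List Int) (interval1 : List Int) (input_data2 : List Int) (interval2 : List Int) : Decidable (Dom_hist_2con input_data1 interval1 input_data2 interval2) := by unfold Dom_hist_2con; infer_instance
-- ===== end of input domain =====

-- B replaces A's per-cell rescans of the whole data list by a single pass over the points that
-- increments a count matrix cell per matching (row,column) bin pair (objective: faster).

-- ===== PORT A =====
def hist_2con (input_data1 : List Int) (interval1 : List Int) (input_data2 : List Int) (interval2 : List Int) : List String × List String × List (List Int) :=
  let l1 : Int := (interval1.length : Int) - 1
  let l2 : Int := (interval2.length : Int) - 1
  let interval_list2 : List String :=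
    (PySem.List.pyRange 0 l2 1).foldl (fun acc j =>
      acc ++ [PySem.Int.toStr (PySem.List.pyGetD interval2 j 0) ++ "~" ++ PySem.Int.toStr (PySem.List.pyGetD interval2 (j + 1) 0)]) []
  let st :=
    (PySem.List.pyRange 0 l1 1).foldl (fun (st : List String × List (List Int)) i =>
      (st.1 ++ [PySem.Int.toStr (PySem.List.pyGetD interval1 i 0) ++ "~" ++ PySem.Int.toStr (PySem.List.pyGetD interval1 (i + 1) 0)],
       st.2 ++ [(PySem.List.pyRange 0 l2 1).foldl (fun (row : List Int) j =>
          row ++ [(PySem.List.pyRange 0 (input_data1.length : Int) 1).foldl (fun (pp : Int) k =>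
            if PySem.List.pyGetD input_data1 k 0 ≥ PySem.List.pyGetD interval1 i 0 ∧
               PySem.List.pyGetD input_data1 k 0 < PySem.List.pyGetD interval1 (i + 1) 0 ∧
               PySem.List.pyGetD input_data2 k 0 ≥ PySem.List.pyGetD interval2 j 0 ∧
               PySem.List.pyGetD input_data2 k 0 < PySem.List.pyGetD interval2 (j + 1) 0
            then pp + 1 else pp) 0]) []]))
      (([] : List String), ([] : List (List Int)))
  (st.1, interval_list2, st.2)

-- ===== PORT B =====
-- the list of bin indices of iv whose half-open interval contains v
def pvBins (iv : List Int) (l : Int) (v : Int) : List Int :=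
  (PySem.List.pyRange 0 l 1).filter (fun i =>
    decide (PySem.List.pyGetD iv i 0 ≤ v ∧ v < PySem.List.pyGetD iv (i + 1) 0))

-- res[i][j] += 1
def pvBump (m : List (List Int)) (i j : Int) : List (List Int) :=
  PySem.List.pySetD m i
    (PySem.List.pySetD (PySem.List.pyGetD m i []) j
      (PySem.List.pyGetD (PySem.List.pyGetD m i []) j 0 + 1))

def hist_2con_alt (input_data1 : List Int) (interval1 : List Int) (input_data2 : List Int) (interval2 : List Int) : List String × List String × List (List Int) :=
  let l1 : Int := (interval1.length : Int) - 1
  let l2 : Int := (interval2.length : Int) - 1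
  let interval_list1 := (PySem.List.pyRange 0 l1 1).map (fun i =>
    PySem.Int.toStr (PySem.List.pyGetD interval1 i 0) ++ "~" ++ PySem.Int.toStr (PySem.List.pyGetD interval1 (i + 1) 0))
  let interval_list2 := (PySem.List.pyRange 0 l2 1).map (fun j =>
    PySem.Int.toStr (PySem.List.pyGetD interval2 j 0) ++ "~" ++ PySem.Int.toStr (PySem.List.pyGetD interval2 (j + 1) 0))
  let res0 : List (List Int) := (PySem.List.pyRange 0 l1 1).map (fun _ => List.replicate l2.toNat 0)
  let res := (input_data1.zip input_data2).foldl (fun m p =>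
      (pvBins interval1 l1 p.1).foldl (fun m i =>
        (pvBins interval2 l2 p.2).foldl (fun m j => pvBump m i j) m) m) res0
  (interval_list1, interval_list2, res)

-- ===== PRECONDITION & SPEC =====
-- Pre_ excludes exactly the inputs where A raises IndexError: input_data2 shorter than
-- input_data1 while both interval lists have at least 2 entries (so the counting loops run).
def Pre_hist_2con (input_data1 : List Int) (interval1 : List Int) (input_data2 : List Int) (interval2 : List Int) : Prop :=
  input_data1.length ≤ input_data2.length ∨ interval1.length < 2 ∨ interval2.length < 2
instance (input_data1 : List Int) (interval1 : List Int) (input_data2 : List Int) (interval2 : List Int) : Decidable (Pre_hist_2con input_data1 interval1 input_data2 interval2) := by unfold Pre_hist_2con; infer_instance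

def pvWitness_hist_2con : List Int × List Int × List Int × List Int := ([1], [0, 2], [1], [0, 2])

def Spec_hist_2con (input_data1 : List Int) (interval1 : List Int) (input_data2 : List Int) (interval2 : List Int) (out : List String × List String × List (List Int)) : Prop := out = hist_2con_alt input_data1 interval1 input_data2 interval2
instance (input_data1 : List Int) (interval1 : List Int) (input_data2 : List Int) (interval2 : List Int) (out : List String × List String × List (List Int)) : Decidable (Spec_hist_2con input_data1 interval1 input_data2 interval2 out) := by unfold Spec_hist_2con; infer_instance

-- ===== CLAIM (what is proved, stated in full; the proofs are below) =====
def Claim_equal_hist_2con : Prop := ∀ (input_data1 : List Int) (interval1 : List Int) (input_data2 : List Int) (interval2 : List Int), Dom_hist_2con input_data1 interval1 input_data2 interval2 → Pre_hist_2con input_data1 interval1 input_data2 interval2 → Spec_hist_2con input_data1 interval1 input_data2 interval2 (hist_2con input_data1 interval1 input_data2 interval2)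

-- ===== LEMMAS AND PROOFS =====


def pvMat (l1 l2 : Int) (F : Int → Int → Int) : List (List Int) :=
  (PySem.List.pyRange 0 l1 1).map (fun i => (PySem.List.pyRange 0 l2 1).map (F i))

theorem pvMat_congr {l1 l2 : Int} {F G : Int → Int → Int}
    (h : ∀ i ∈ PySem.List.pyRange 0 l1 1, ∀ j ∈ PySem.List.pyRange 0 l2 1, F i j = G i j) :
    pvMat l1 l2 F = pvMat l1 l2 G := by
  unfold pvMat
  exact List.map_congr_left fun i hi => List.map_congr_left fun j hj => h i hi j hj

theorem pvSet_map_range {α : Type} (l : Int) (F : Int → α) (j : Int) (v : α)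
    (hj : j ∈ PySem.List.pyRange 0 l 1) :
    PySem.List.pySetD ((PySem.List.pyRange 0 l 1).map F) j v
      = (PySem.List.pyRange 0 l 1).map (fun j' => if j' = j then v else F j') := by
  rw [PySem.List.mem_pyRange_one] at hj
  rw [PySem.List.pySetD_of_nonneg _ v hj.1]
  apply List.ext_getElem
  · simp
  · intro k h1 h2
    simp only [List.getElem_set, List.getElem_map, PySem.List.getElem_pyRange_one]
    have hk : k < l.toNat := by simpa [PySem.List.length_pyRange_one] using h2
    split_ifs with h3 h4 h5 <;> first | rfl | omega

theorem pvBump_mat (l1 l2 : Int) (F : Int → Int → Int) (i j : Int)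
    (hi : i ∈ PySem.List.pyRange 0 l1 1) (hj : j ∈ PySem.List.pyRange 0 l2 1) :
    pvBump (pvMat l1 l2 F) i j
      = pvMat l1 l2 (fun i' j' => if i' = i ∧ j' = j then F i' j' + 1 else F i' j') := by
  have hi' := PySem.List.mem_pyRange_one.mp hi
  have hj' := PySem.List.mem_pyRange_one.mp hj
  unfold pvBump pvMat
  rw [PySem.List.pyGetD_map_pyRange_of_nonneg _ l1 i [] hi'.1 hi'.2]
  rw [PySem.List.pyGetD_map_pyRange_of_nonneg (F i) l2 j 0 hj'.1 hj'.2]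
  rw [pvSet_map_range l2 (F i) j _ hj]
  rw [pvSet_map_range l1 _ i _ hi]
  apply List.map_congr_left
  intro i' hi2
  by_cases hii : i' = i
  · subst hii
    simp only [if_pos rfl]
    apply List.map_congr_left
    intro j' hj2
    by_cases hjj : j' = j <;> simp [hjj]
  · simp only [if_neg hii]
    apply List.map_congr_left
    intro j' hj2
    simp [hii]

theorem pvCols_fold (l1 l2 : Int) (F : Int → Int → Int) (i : Int) (cols : List Int)
    (hi : i ∈ PySem.List.pyRange 0 l1 1)
    (hsub : ∀ j ∈ cols, j ∈ PySem.List.pyRange 0 l2 1) (hnd : cols.Nodup) :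
    cols.foldl (fun m j => pvBump m i j) (pvMat l1 l2 F)
      = pvMat l1 l2 (fun i' j' => if i' = i ∧ j' ∈ cols then F i' j' + 1 else F i' j') := by
  induction cols generalizing F with
  | nil => simp
  | cons c cs ih =>
    simp only [List.foldl_cons]
    rw [pvBump_mat l1 l2 F i c hi (hsub c (by simp))]
    rw [ih _ (fun j hj => hsub j (List.mem_cons_of_mem _ hj)) (List.Nodup.of_cons hnd)]
    apply pvMat_congr
    intro i' _ j' _
    have hc : c ∉ cs := (List.nodup_cons.mp hnd).1
    by_cases h1 : i' = i <;> by_cases h2 : j' = c <;>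
      simp [h1, h2, List.mem_cons] <;> intro h <;> simp_all

theorem pvRows_fold (l1 l2 : Int) (F : Int → Int → Int) (rows cols : List Int)
    (hrs : ∀ i ∈ rows, i ∈ PySem.List.pyRange 0 l1 1) (hrnd : rows.Nodup)
    (hcs : ∀ j ∈ cols, j ∈ PySem.List.pyRange 0 l2 1) (hcnd : cols.Nodup) :
    rows.foldl (fun m i => cols.foldl (fun m j => pvBump m i j) m) (pvMat l1 l2 F)
      = pvMat l1 l2 (fun i' j' => if i' ∈ rows ∧ j' ∈ cols then F i' j' + 1 else F i' j') := by
  induction rows generalizing F with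
  | nil => simp
  | cons r rs ih =>
    simp only [List.foldl_cons]
    rw [pvCols_fold l1 l2 F r cols (hrs r (by simp)) hcs hcnd]
    rw [ih _ (fun i hi => hrs i (List.mem_cons_of_mem _ hi)) (List.Nodup.of_cons hrnd)]
    apply pvMat_congr
    intro i' _ j' _
    have hr : r ∉ rs := (List.nodup_cons.mp hrnd).1
    by_cases h1 : i' = r <;> by_cases h2 : j' ∈ cols <;>
      simp [h1, h2, List.mem_cons] <;> intro h <;> simp_all

def pvP (iv1 iv2 : List Int) (i j : Int) (p : Int × Int) : Bool :=
  decide (PySem.List.pyGetD iv1 i 0 ≤ p.1 ∧ p.1 < PySem.List.pyGetD iv1 (i + 1) 0) &&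
  decide (PySem.List.pyGetD iv2 j 0 ≤ p.2 ∧ p.2 < PySem.List.pyGetD iv2 (j + 1) 0)

theorem pvStep_mat (iv1 iv2 : List Int) (l1 l2 : Int) (F : Int → Int → Int) (p : Int × Int) :
    (pvBins iv1 l1 p.1).foldl (fun m i =>
        (pvBins iv2 l2 p.2).foldl (fun m j => pvBump m i j) m) (pvMat l1 l2 F)
      = pvMat l1 l2 (fun i j => F i j + if pvP iv1 iv2 i j p then 1 else 0) := by
  unfold pvBins
  rw [pvRows_fold l1 l2 F _ _
      (fun i hi => List.mem_of_mem_filter hi)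
      ((PySem.List.nodup_pyRange_one 0 l1).filter _)
      (fun j hj => List.mem_of_mem_filter hj)
      ((PySem.List.nodup_pyRange_one 0 l2).filter _)]
  apply pvMat_congr
  intro i hi j hj
  have h1 : (i ∈ pvBins iv1 l1 p.1) ↔
      (PySem.List.pyGetD iv1 i 0 ≤ p.1 ∧ p.1 < PySem.List.pyGetD iv1 (i + 1) 0) := by
    unfold pvBins; rw [List.mem_filter]; simp [hi]
  have h2 : (j ∈ pvBins iv2 l2 p.2) ↔
      (PySem.List.pyGetD iv2 j 0 ≤ p.2 ∧ p.2 < PySem.List.pyGetD iv2 (j + 1) 0) := by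
    unfold pvBins; rw [List.mem_filter]; simp [hj]
  by_cases hA : PySem.List.pyGetD iv1 i 0 ≤ p.1 ∧ p.1 < PySem.List.pyGetD iv1 (i + 1) 0 <;>
    by_cases hB : PySem.List.pyGetD iv2 j 0 ≤ p.2 ∧ p.2 < PySem.List.pyGetD iv2 (j + 1) 0 <;>
    simp [pvP, h1, h2, hA, hB, PySem.List.mem_pyRange_one.mp hi, PySem.List.mem_pyRange_one.mp hj]

theorem pvPts_fold (iv1 iv2 : List Int) (l1 l2 : Int) (pts : List (Int × Int)) (F : Int → Int → Int) :
    pts.foldl (fun m p =>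
      (pvBins iv1 l1 p.1).foldl (fun m i =>
        (pvBins iv2 l2 p.2).foldl (fun m j => pvBump m i j) m) m)
      (pvMat l1 l2 F)
      = pvMat l1 l2 (fun i j => F i j + (pts.countP (pvP iv1 iv2 i j) : Int)) := by
  induction pts generalizing F with
  | nil => simp
  | cons p ps ih =>
    simp only [List.foldl_cons]
    rw [pvStep_mat iv1 iv2 l1 l2 F p, ih]
    apply pvMat_congr
    intro i _ j _
    rw [List.countP_cons]
    by_cases h : pvP iv1 iv2 i j p <;> simp [h] <;> push_cast <;> ring

theorem pvZip_eq_map_range (d1 d2 : List Int) (h : d1.length ≤ d2.length) :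
    (PySem.List.pyRange 0 (d1.length : Int) 1).map
      (fun k => (PySem.List.pyGetD d1 k 0, PySem.List.pyGetD d2 k 0)) = d1.zip d2 := by
  apply List.ext_getElem
  · simp [PySem.List.length_pyRange_one]; omega
  · intro k h1 h2
    have hk : k < d1.length := by simpa [PySem.List.length_pyRange_one] using h1
    simp only [List.getElem_map, PySem.List.getElem_pyRange_one, List.getElem_zip]
    have e1 : PySem.List.pyGetD d1 (0 + (k : Int)) 0 = d1[k] := by
      rw [PySem.List.pyGetD_eq_getElem] <;> simp <;> omega
    have e2 : PySem.List.pyGetD d2 (0 + (k : Int)) 0 = d2[k]'(by omega) := by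
      rw [PySem.List.pyGetD_eq_getElem] <;> simp <;> omega
    rw [e1, e2]

theorem pvCntA (d1 d2 iv1 iv2 : List Int) (h : d1.length ≤ d2.length) (i j : Int) :
    (PySem.List.pyRange 0 (d1.length : Int) 1).foldl (fun (pp : Int) k =>
      if PySem.List.pyGetD d1 k 0 ≥ PySem.List.pyGetD iv1 i 0 ∧
         PySem.List.pyGetD d1 k 0 < PySem.List.pyGetD iv1 (i + 1) 0 ∧
         PySem.List.pyGetD d2 k 0 ≥ PySem.List.pyGetD iv2 j 0 ∧
         PySem.List.pyGetD d2 k 0 < PySem.List.pyGetD iv2 (j + 1) 0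
      then pp + 1 else pp) 0
      = ((d1.zip d2).countP (pvP iv1 iv2 i j) : Int) := by
  rw [PySem.List.foldl_ite_add_one]
  rw [← pvZip_eq_map_range d1 d2 h, List.countP_map]
  have e : ∀ k ∈ PySem.List.pyRange 0 (d1.length : Int) 1,
      decide (PySem.List.pyGetD d1 k 0 ≥ PySem.List.pyGetD iv1 i 0 ∧
         PySem.List.pyGetD d1 k 0 < PySem.List.pyGetD iv1 (i + 1) 0 ∧
         PySem.List.pyGetD d2 k 0 ≥ PySem.List.pyGetD iv2 j 0 ∧
         PySem.List.pyGetD d2 k 0 < PySem.List.pyGetD iv2 (j + 1) 0) = true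
      ↔ ((pvP iv1 iv2 i j) ∘ fun k => (PySem.List.pyGetD d1 k 0, PySem.List.pyGetD d2 k 0)) k = true := by
    intro k _
    simp only [pvP, Function.comp_apply, Bool.and_eq_true, decide_eq_true_eq, ge_iff_le]
    tauto
  rw [List.countP_congr e]
  simp

theorem pvFoldl_pair {α β γ : Type} (L : List α) (g : α → β) (h : α → γ) (a : List β) (b : List γ) :
    L.foldl (fun st x => (st.1 ++ [g x], st.2 ++ [h x])) (a, b) = (a ++ L.map g, b ++ L.map h) := by
  induction L generalizing a b with
  | nil => simp
  | cons x xs ih => simp [ih]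

-- ===== VERDICT (by name: the statement is the Claim_ definition above) =====
theorem hist_2con_spec : Claim_equal_hist_2con := by
  intro d1 iv1 d2 iv2 _ hpre
  unfold Spec_hist_2con hist_2con hist_2con_alt
  simp only [pvFoldl_pair, PySem.List.foldl_append_singleton_eq_map, List.nil_append]
  have hres0 : ((PySem.List.pyRange 0 ((iv1.length : Int) - 1) 1).map
      (fun _ => List.replicate ((iv2.length : Int) - 1).toNat (0 : Int)))
      = pvMat ((iv1.length : Int) - 1) ((iv2.length : Int) - 1) (fun _ _ => (0 : Int)) := by
    unfold pvMat
    apply List.map_congr_left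
    intro _ _
    rw [List.map_const', PySem.List.length_pyRange_one]
    norm_num
  rw [hres0, pvPts_fold iv1 iv2 ((iv1.length : Int) - 1) ((iv2.length : Int) - 1) (d1.zip d2)]
  congr 1
  congr 1
  show pvMat ((iv1.length : Int) - 1) ((iv2.length : Int) - 1) _ = _
  apply pvMat_congr
  intro i hi j hj
  have hi' := PySem.List.mem_pyRange_one.mp hi
  have hj' := PySem.List.mem_pyRange_one.mp hj
  have hd : d1.length ≤ d2.length := by unfold Pre_hist_2con at hpre; omega
  rw [pvCntA d1 d2 iv1 iv2 hd i j]
  omega
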